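-- pv_equiv track=rewrite | github.com/wallyrebel/Newsletter | providers/holidays.py | curate_observances
-- ===== SOURCE A (Python) =====
-- from typing import Optional, List, Tuple
--
-- def curate_observances(observances: List[str], max_count: int = 12) -> List[str]:
--     """
--     Curate and filter observances to keep the most interesting ones.
--
--     Args:
--         observances: Raw list of observances
--         max_count: Maximum number to return
--
--     Returns:
--         Curated list of observances
--     """
--     # Keywords that indicate more interesting/recognizable observances
--     priority_keywords = [
--         'National', 'World', 'International', 'Day', 'Week', 'Month',
--         'Awareness', 'Appreciation', 'Celebration'
--     ]
--
--     # Keywords to filter out (usually too obscure or commercial)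
--     filter_keywords = [
--         'sponsored', 'trademark', '®', '™'
--     ]
--
--     # Score and filter
--     scored = []
--     for obs in observances:
--         # Skip filtered items
--         obs_lower = obs.lower()
--         if any(kw.lower() in obs_lower for kw in filter_keywords):
--             continue
--
--         # Score based on priority keywords
--         score = sum(1 for kw in priority_keywords if kw.lower() in obs_lower)
--
--         # Boost "National ___ Day" patterns
--         if 'national' in obs_lower and 'day' in obs_lower:
--             score += 2
--
--         scored.append((score, obs))
--
--     # Sort by score (descending) and take top items
--     scored.sort(key=lambda x: x[0], reverse=True)
--
--     # Remove duplicates (case-insensitive)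
--     seen = set()
--     result = []
--     for _, obs in scored:
--         key = obs.lower().strip()
--         if key not in seen:
--             seen.add(key)
--             result.append(obs)
--             if len(result) >= max_count:
--                 break
--
--     return result
-- ===== SOURCE B (Python) =====
-- from typing import List
--
--
-- def curate_observances(observances: List[str], max_count: int = 12) -> List[str]:
--     """Bucket (counting-sort) variant: group qualifying observances by score,
--     then emit buckets from highest score to lowest, deduping case-insensitively."""
--     priority_keywords = [
--         'National', 'World', 'International', 'Day', 'Week', 'Month',
--         'Awareness', 'Appreciation', 'Celebration'
--     ]
--     filter_keywords = [
--         'sponsored', 'trademark', '®', '™'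
--     ]
--
--     buckets = {}
--     for obs in observances:
--         obs_lower = obs.lower()
--         if any(kw.lower() in obs_lower for kw in filter_keywords):
--             continue
--         score = sum(1 for kw in priority_keywords if kw.lower() in obs_lower)
--         if 'national' in obs_lower and 'day' in obs_lower:
--             score += 2
--         buckets.setdefault(score, []).append(obs)
--
--     # Scores lie in 0..11 (9 keywords + boost of 2); walk them high to low.
--     seen = set()
--     result = []
--     for score in range(11, -1, -1):
--         for obs in buckets.get(score, []):
--             key = obs.lower().strip()
--             if key not in seen:
--                 seen.add(key)
--                 result.append(obs)
--                 if len(result) >= max_count: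
--                     return result
--     return result
-- ===== Notes on version B (the rewrite author's own statement) =====
-- stated objective: alternative
-- what changed: Replaces A's comparison sort of the scored list by a bucket/counting pass: qualifying observances are grouped in a dict keyed by score, then emitted from score 11 down to 0 (scores are bounded by 9 keywords + 2 boost), with the same case-insensitive dedup and early stop; stability of Python's sort makes the results identical.
import Mathlib
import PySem

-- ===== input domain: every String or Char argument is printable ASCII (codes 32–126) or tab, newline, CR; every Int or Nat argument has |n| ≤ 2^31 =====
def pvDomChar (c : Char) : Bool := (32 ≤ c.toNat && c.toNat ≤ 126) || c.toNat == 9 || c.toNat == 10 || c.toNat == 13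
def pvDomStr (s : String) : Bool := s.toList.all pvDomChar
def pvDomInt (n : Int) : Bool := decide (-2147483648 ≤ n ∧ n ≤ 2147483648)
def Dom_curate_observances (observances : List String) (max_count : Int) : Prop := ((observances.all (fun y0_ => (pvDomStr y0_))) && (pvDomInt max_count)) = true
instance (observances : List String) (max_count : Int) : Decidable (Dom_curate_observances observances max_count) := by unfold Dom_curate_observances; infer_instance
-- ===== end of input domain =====

-- B replaces A's comparison sort by a counting/bucket pass over the 12 possible scores (same filter+score and dedup steps); objective: alternative algorithm.

-- ===== PORT A =====
-- keyword constants, shared verbatim by both Pythons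
def pvPriority : List String :=
  ["National", "World", "International", "Day", "Week", "Month",
   "Awareness", "Appreciation", "Celebration"]
def pvFilterKw : List String := ["sponsored", "trademark", "®", "™"]

-- the filter+score pass on one observance — these lines are verbatim identical in Source A and Source B
def pvScore? (obs : String) : Option Int :=
  let obs_lower := PySem.Str.lower obs
  if pvFilterKw.any (fun kw => PySem.Str.isIn (PySem.Str.lower kw) obs_lower) then none
  else
    let score : Int :=
      pvPriority.foldl (fun acc kw => if PySem.Str.isIn (PySem.Str.lower kw) obs_lower then acc + 1 else acc) 0
    let score := if PySem.Str.isIn "national" obs_lower && PySem.Str.isIn "day" obs_lower then score + 2 else score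
    some score

-- A's final loop: dedup (case-insensitive) and break once len(result) >= max_count
def pvDedupTake : List (Int × String) → PySem.Set String → List String → Int → List String
  | [], _, result, _ => result
  | (_, obs) :: rest, seen, result, mc =>
    let key := PySem.Str.strip (PySem.Str.lower obs)
    if PySem.Set.contains seen key then pvDedupTake rest seen result mc
    else
      let result' := result ++ [obs]
      if mc ≤ (result'.length : Int) then result'
      else pvDedupTake rest (PySem.Set.add seen key) result' mc

def curate_observances (observances : List String) (max_count : Int) : List String :=
  let scored := observances.foldl
    (fun acc obs => match pvScore? obs with
      | none => acc
      | some s => acc ++ [(s, obs)]) []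
  pvDedupTake (PySem.List.sorted scored (fun p => p.1) true) PySem.Set.empty [] max_count

-- ===== PORT B =====
-- buckets.setdefault(score, []).append(obs)
def pvBuckets (observances : List String) : PySem.Dict Int (List String) :=
  observances.foldl
    (fun d obs => match pvScore? obs with
      | none => d
      | some s => d.insert s (d.getD s [] ++ [obs])) PySem.Dict.empty

-- inner loop over one bucket; the Bool signals the early 'return result'
def pvEmit : List String → PySem.Set String → List String → Int → PySem.Set String × List String × Bool
  | [], seen, result, _ => (seen, result, false)
  | obs :: rest, seen, result, mc =>
    let key := PySem.Str.strip (PySem.Str.lower obs)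
    if PySem.Set.contains seen key then pvEmit rest seen result mc
    else
      let result' := result ++ [obs]
      if mc ≤ (result'.length : Int) then (PySem.Set.add seen key, result', true)
      else pvEmit rest (PySem.Set.add seen key) result' mc

-- outer loop: for score in range(11, -1, -1)
def pvOuter : List Int → PySem.Dict Int (List String) → PySem.Set String → List String → Int → List String
  | [], _, _, result, _ => result
  | s :: rest, d, seen, result, mc =>
    match pvEmit (d.getD s []) seen result mc with
    | (seen', result', stopped) =>
      if stopped then result' else pvOuter rest d seen' result' mc

def curate_observances_alt (observances : List String) (max_count : Int) : List String :=
  pvOuter (PySem.List.pyRange 11 (-1) (-1)) (pvBuckets observances) PySem.Set.empty [] max_count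

-- ===== PRECONDITION & SPEC =====
def Spec_curate_observances (observances : List String) (max_count : Int) (out : List String) : Prop := out = curate_observances_alt observances max_count
instance (observances : List String) (max_count : Int) (out : List String) : Decidable (Spec_curate_observances observances max_count out) := by unfold Spec_curate_observances; infer_instance

-- ===== CLAIM (what is proved, stated in full; the proofs are below) =====
def Claim_equal_curate_observances : Prop := ∀ (observances : List String) (max_count : Int), Dom_curate_observances observances max_count → Spec_curate_observances observances max_count (curate_observances observances max_count)

-- ===== LEMMAS AND PROOFS =====

-- the scoring foldl counts at most pvPriority.length hits
theorem pv_foldl_indicator_bounds (p : String → Bool) :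
    ∀ (l : List String) (acc : Int),
      acc ≤ l.foldl (fun acc kw => if p kw then acc + 1 else acc) acc ∧
      l.foldl (fun acc kw => if p kw then acc + 1 else acc) acc ≤ acc + l.length := by
  intro l
  induction l with
  | nil => intro acc; simp
  | cons kw t ih =>
    intro acc
    simp only [List.foldl_cons, List.length_cons]
    by_cases h : p kw = true
    · obtain ⟨h1, h2⟩ := ih (acc + 1)
      simp only [h, if_true]
      push_cast at h2 ⊢
      constructor <;> omega
    · obtain ⟨h1, h2⟩ := ih acc
      simp only [h, Bool.false_eq_true, if_false]
      push_cast at h2 ⊢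
      constructor <;> omega

theorem pvScore?_bounds (obs : String) (s : Int) (h : pvScore? obs = some s) :
    0 ≤ s ∧ s ≤ 11 := by
  simp only [pvScore?] at h
  split at h
  · exact absurd h (by simp)
  · obtain ⟨h1, h2⟩ := pv_foldl_indicator_bounds
      (fun kw => PySem.Str.isIn (PySem.Str.lower kw) (PySem.Str.lower obs)) pvPriority 0
    have hlen : (pvPriority.length : Int) = 9 := by decide
    rw [hlen] at h2
    split at h <;> (injection h with h; omega)

-- the scoring loop as a filterMap
theorem pv_scored_eq_filterMap (l : List String) :
    ∀ acc : List (Int × String),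
      l.foldl (fun acc obs => match pvScore? obs with
        | none => acc
        | some s => acc ++ [(s, obs)]) acc
      = acc ++ l.filterMap (fun obs => (pvScore? obs).map (fun s => (s, obs))) := by
  induction l with
  | nil => intro acc; simp
  | cons o t ih =>
    intro acc
    simp only [List.foldl_cons, List.filterMap_cons]
    cases h : pvScore? o with
    | none => simpa [h] using ih acc
    | some s => simp [ih (acc ++ [(s, o)])]

-- pvBuckets holds, at key k, exactly the qualifying observances of score k in order
theorem pv_buckets_spec (l : List String) :
    ∀ (d : PySem.Dict Int (List String)) (sc : List (Int × String)),
      (∀ k, d.getD k [] = (sc.filter (fun p => decide (p.1 = k))).map (·.2)) →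
      ∀ k, (l.foldl (fun d obs => match pvScore? obs with
              | none => d
              | some s => d.insert s (d.getD s [] ++ [obs])) d).getD k []
        = ((sc ++ l.filterMap (fun obs => (pvScore? obs).map (fun s => (s, obs)))).filter
            (fun p => decide (p.1 = k))).map (·.2) := by
  induction l with
  | nil => intro d sc h k; simpa using h k
  | cons o t ih =>
    intro d sc h k
    simp only [List.foldl_cons, List.filterMap_cons]
    cases ho : pvScore? o with
    | none => simpa using ih d sc h k
    | some s =>
      simp only [Option.map_some]
      have := ih (d.insert s (d.getD s [] ++ [o])) (sc ++ [(s, o)]) ?_ k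
      · simpa using this
      · intro k'
        rw [PySem.Dict.getD_insert]
        by_cases hk : k' = s
        · subst hk; simp [h k']
        · simp [hk, h k', List.filter_append, Ne.symm hk]

-- insertBy passes over a prefix it does not go before
theorem pv_insertBy_append {α : Type} (before : α → α → Bool) (x : α) :
    ∀ (l₁ l₂ : List α), (∀ b ∈ l₁, before x b = false) →
      PySem.List.insertBy before x (l₁ ++ l₂) = l₁ ++ PySem.List.insertBy before x l₂ := by
  intro l₁
  induction l₁ with
  | nil => intro l₂ _; simp
  | cons b t ih =>
    intro l₂ h
    simp only [List.cons_append, PySem.List.insertBy, h b (by simp)]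
    simp only [Bool.false_eq_true, if_false, List.cons.injEq, true_and]
    exact ih l₂ (fun c hc => h c (by simp [hc]))

theorem pv_insertBy_front {α : Type} (before : α → α → Bool) (x : α) (l : List α)
    (h : ∀ b ∈ l, before x b = true) :
    PySem.List.insertBy before x l = x :: l := by
  cases l with
  | nil => rfl
  | cons b t => simp [PySem.List.insertBy, h b (by simp)]

-- a stable reverse sort is the concatenation of its buckets, keys strictly descending
theorem pv_sorted_rev_buckets (ks : List Int) (hks : ks.Pairwise (· > ·)) :
    ∀ (xs : List (Int × String)), (∀ p ∈ xs, p.1 ∈ ks) →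
      PySem.List.sorted xs (fun p => p.1) true
        = ks.flatMap (fun k => xs.filter (fun p => decide (p.1 = k))) := by
  have main : ∀ (xs pref : List (Int × String)), (∀ p ∈ xs, p.1 ∈ ks) →
      xs.foldl (fun acc x => PySem.List.insertBy (fun a b => decide (b.1 < a.1)) x acc)
        (ks.flatMap (fun k => pref.filter (fun p => decide (p.1 = k))))
      = ks.flatMap (fun k => (pref ++ xs).filter (fun p => decide (p.1 = k))) := by
    intro xs
    induction xs with
    | nil => intro pref _; simp
    | cons x t ih =>
      intro pref hmem
      simp only [List.foldl_cons]
      have hx : x.1 ∈ ks := hmem x (by simp)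
      obtain ⟨ks₁, ks₂, hsplit⟩ := List.append_of_mem hx
      have hgt₁ : ∀ k' ∈ ks₁, k' > x.1 := by
        intro k' hk'
        have := hks
        rw [hsplit, List.pairwise_append] at this
        exact this.2.2 k' hk' x.1 (by simp)
      have hlt₂ : ∀ k' ∈ ks₂, x.1 > k' := by
        intro k' hk'
        have := hks
        rw [hsplit] at this
        have := (List.pairwise_append.mp this).2.1
        exact (List.pairwise_cons.mp this).1 k' hk'
      have hstep : PySem.List.insertBy (fun a b => decide (b.1 < a.1)) x
            (ks.flatMap (fun k => pref.filter (fun p => decide (p.1 = k))))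
          = ks.flatMap (fun k => (pref ++ [x]).filter (fun p => decide (p.1 = k))) := by
        rw [hsplit]
        simp only [List.flatMap_append, List.flatMap_cons]
        rw [pv_insertBy_append]
        · congr 1
          · apply List.flatMap_congr  -- ks₁ buckets unchanged
            intro k hk
            have : x.1 ≠ k := by have := hgt₁ k hk; omega
            simp [List.filter_append, this]
          rw [pv_insertBy_append]
          · have hfront : PySem.List.insertBy (fun a b => decide (b.1 < a.1)) x
                (ks₂.flatMap (fun k => pref.filter (fun p => decide (p.1 = k))))
              = x :: ks₂.flatMap (fun k => pref.filter (fun p => decide (p.1 = k))) := by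
              apply pv_insertBy_front
              intro b hb
              simp only [List.mem_flatMap, List.mem_filter] at hb
              obtain ⟨k, hk, _, hbk⟩ := hb
              have hbk' : b.1 = k := of_decide_eq_true hbk
              have := hlt₂ k hk
              simp only [decide_eq_true_eq]; omega
            rw [hfront]
            have h2 : ∀ k ∈ ks₂, (pref ++ [x]).filter (fun p : Int × String => decide (p.1 = k))
                = pref.filter (fun p => decide (p.1 = k)) := by
              intro k hk
              have : x.1 ≠ k := by have := hlt₂ k hk; omega
              simp [List.filter_append, this]
            rw [List.flatMap_congr h2]
            simp [List.filter_append]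
          · intro b hb
            simp only [List.mem_filter] at hb
            have : b.1 = x.1 := of_decide_eq_true hb.2
            simp [this]
        · intro b hb
          simp only [List.mem_flatMap, List.mem_filter] at hb
          obtain ⟨k, hk, _, hbk⟩ := hb
          have hbk' : b.1 = k := of_decide_eq_true hbk
          have := hgt₁ k hk
          simp only [decide_eq_false_iff_not]; omega
      rw [hstep, ih (pref ++ [x]) (fun p hp => hmem p (by simp [hp]))]
      simp
  intro xs hmem
  rw [PySem.List.sorted_rev_eq_foldl_insertBy]
  have h0 : ks.flatMap (fun k => ([] : List (Int × String)).filter (fun p => decide (p.1 = k))) = [] := by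
    induction ks <;> simp [*]
  have := main xs [] hmem
  rw [h0] at this
  exact this

-- one bucket of pvEmit behaves like pvDedupTake on the corresponding pairs
theorem pv_emit_dedup (mc : Int) :
    ∀ (l : List (Int × String)) (seen : PySem.Set String) (result : List String)
      (rest : List (Int × String)),
      pvDedupTake (l ++ rest) seen result mc
        = (match pvEmit (l.map (·.2)) seen result mc with
           | (seen', result', stopped) =>
             if stopped then result' else pvDedupTake rest seen' result' mc) := by
  intro l
  induction l with
  | nil => intro seen result rest; simp [pvEmit]
  | cons p t ih =>
    intro seen result rest
    obtain ⟨s, obs⟩ := p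
    simp only [List.cons_append, List.map_cons, pvDedupTake, pvEmit, List.length_append,
      List.length_singleton, Nat.cast_add, Nat.cast_one]
    by_cases hseen : PySem.Set.contains seen (PySem.Str.strip (PySem.Str.lower obs)) = true
    · simp only [hseen, if_true]; exact ih seen result rest
    · simp only [hseen, Bool.false_eq_true, if_false]
      by_cases hfull : mc ≤ (result.length : Int) + 1
      · simp [hfull]
      · simp only [hfull, if_false]
        exact ih _ _ rest

-- the outer loop over buckets equals the dedup loop over the flattened pairs
theorem pv_outer_dedup (mc : Int) (d : PySem.Dict Int (List String))
    (g : Int → List (Int × String)) :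
    ∀ (ks : List Int) (seen : PySem.Set String) (result : List String),
      (∀ k ∈ ks, (g k).map (·.2) = d.getD k []) →
      pvOuter ks d seen result mc = pvDedupTake (ks.flatMap g) seen result mc := by
  intro ks
  induction ks with
  | nil => intro seen result _; simp [pvOuter, pvDedupTake]
  | cons k t ih =>
    intro seen result hg
    simp only [pvOuter, List.flatMap_cons]
    rw [pv_emit_dedup mc (g k) seen result (t.flatMap g), hg k (by simp)]
    cases he : pvEmit (d.getD k []) seen result mc with
    | mk seen' r' =>
      obtain ⟨result', stopped⟩ := r'
      by_cases hs : stopped = true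
      · simp [hs]
      · simp only [Bool.not_eq_true] at hs
        subst hs
        simp only [Bool.false_eq_true, if_false]
        exact ih seen' result' (fun k' hk' => hg k' (by simp [hk']))

-- ===== VERDICT (by name: the statement is the Claim_ definition above) =====
theorem curate_observances_spec : Claim_equal_curate_observances := by
  intro observances max_count _
  unfold Spec_curate_observances curate_observances curate_observances_alt
  simp only []
  set scored := observances.filterMap (fun obs => (pvScore? obs).map (fun s => (s, obs))) with hscored
  have hfold : observances.foldl (fun acc obs => match pvScore? obs with
      | none => acc
      | some s => acc ++ [(s, obs)]) [] = scored := by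
    simpa using pv_scored_eq_filterMap observances []
  rw [hfold]
  have hks : PySem.List.pyRange 11 (-1) (-1) = [11,10,9,8,7,6,5,4,3,2,1,0] := by decide
  have hmem : ∀ p ∈ scored, p.1 ∈ ([11,10,9,8,7,6,5,4,3,2,1,0] : List Int) := by
    intro p hp
    rw [hscored, List.mem_filterMap] at hp
    obtain ⟨obs, _, hobs⟩ := hp
    cases h : pvScore? obs with
    | none => simp [h] at hobs
    | some s =>
      simp only [h, Option.map_some, Option.some.injEq] at hobs
      obtain ⟨h0, h11⟩ := pvScore?_bounds obs s h
      subst hobs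
      simp only [List.mem_cons, List.not_mem_nil, or_false]
      omega
  have hpw : ([11,10,9,8,7,6,5,4,3,2,1,0] : List Int).Pairwise (· > ·) := by decide
  rw [pv_sorted_rev_buckets _ hpw scored hmem]
  rw [hks]
  rw [pv_outer_dedup max_count (pvBuckets observances)
      (fun k => scored.filter (fun p => decide (p.1 = k))) _ PySem.Set.empty []]
  intro k _
  have := pv_buckets_spec observances PySem.Dict.empty []
    (by intro k'; simp [PySem.Dict.getD_empty]) k
  unfold pvBuckets
  simp only at this ⊢
  rw [this, List.nil_append, hscored]
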